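-- pv_equiv track=rewrite | github.com/abinavChandar/demo_env_l4 | arc_prompt_from_instructions_only.py | is_valid_grid
-- ===== SOURCE A (Python) =====
-- from typing import Any, Dict, List, Optional, Tuple
--
-- def is_valid_grid(obj: Any) -> bool:
--     if not isinstance(obj, list) or not obj:
--         return False
--     w = None
--     for row in obj:
--         if not isinstance(row, list) or not row:
--             return False
--         if w is None:
--             w = len(row)
--         if len(row) != w:
--             return False
--         for v in row:
--             if not isinstance(v, int) or v < 0 or v > 9:
--                 return False
--     return True
-- ===== SOURCE B (Python) =====
-- def is_valid_grid(obj) -> bool: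
--     if not isinstance(obj, list) or not obj:
--         return False
--     if not all(isinstance(r, list) for r in obj):
--         return False
--     # zip(*obj) truncates to the shortest row; the grid is rectangular with
--     # nonempty rows iff cols is nonempty and sum of row lengths == rows * cols.
--     cols = list(zip(*obj))
--     if not cols:
--         return False
--     if sum(len(r) for r in obj) != len(obj) * len(cols):
--         return False
--     return all(isinstance(v, int) and 0 <= v <= 9 for col in cols for v in col)
-- ===== Notes on version B (the rewrite author's own statement) =====
-- stated objective: alternative
-- what changed: Replaces A's stateful row loop (running width w, early returns) by a transpose-based check: build cols = zip(*obj) (which truncates to the shortest row) and decide rectangularity by the counting identity sum(row lengths) == rows * cols, then validate cells column-wise over the transpose.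
import Mathlib
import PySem

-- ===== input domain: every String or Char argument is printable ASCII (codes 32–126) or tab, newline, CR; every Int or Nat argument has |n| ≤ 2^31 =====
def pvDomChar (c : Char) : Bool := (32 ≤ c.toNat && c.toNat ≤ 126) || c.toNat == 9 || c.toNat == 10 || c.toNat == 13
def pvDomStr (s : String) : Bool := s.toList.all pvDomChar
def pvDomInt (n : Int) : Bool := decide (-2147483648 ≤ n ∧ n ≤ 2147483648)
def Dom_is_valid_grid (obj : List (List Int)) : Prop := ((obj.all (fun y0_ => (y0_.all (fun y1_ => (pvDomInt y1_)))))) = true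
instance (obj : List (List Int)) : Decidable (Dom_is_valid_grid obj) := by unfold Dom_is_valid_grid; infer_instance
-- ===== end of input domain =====

-- B replaces A's stateful width-tracking loop by a transpose-based check: cols = zip(*obj)
-- truncates to the shortest row, rectangularity is the counting identity
-- sum(row lengths) == rows * cols, and cells are validated column-wise (objective: alternative).

-- ===== PORT A =====
-- inner 'for v in row' loop of A
def pvCellLoop : List Int → Bool
  | [] => true
  | v :: rest => if v < 0 || v > 9 then false else pvCellLoop rest

-- outer 'for row in obj' loop of A, carrying the running width w (None at start)
def pvRowLoop : List (List Int) → Option Int → Bool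
  | [], _ => true
  | row :: rest, w =>
    if row.isEmpty then false
    else
      let w' := w.getD (row.length : Int)
      if (row.length : Int) ≠ w' then false
      else if pvCellLoop row then pvRowLoop rest (some w') else false

def is_valid_grid (obj : List (List Int)) : Bool :=
  if obj.isEmpty then false else pvRowLoop obj none

-- ===== PORT B =====
-- len(list(zip(*obj))) = minimum row length (for nonempty obj)
def pvNCols : List (List Int) → Nat
  | [] => 0
  | r :: rest => rest.foldl (fun a q => min a q.length) r.length

def is_valid_grid_alt (obj : List (List Int)) : Bool :=
  if obj.isEmpty then false
  else
    let m := pvNCols obj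
    if m = 0 then false
    else if (obj.map List.length).sum ≠ obj.length * m then false
    else
      -- cells checked column-wise over the transpose: column j holds r[j] for each row r
      (List.range m).all (fun j => obj.all (fun r =>
        decide (0 ≤ r.getD j 0) && decide (r.getD j 0 ≤ 9)))

-- ===== PRECONDITION & SPEC =====
def Spec_is_valid_grid (obj : List (List Int)) (out : Bool) : Prop := out = is_valid_grid_alt obj
instance (obj : List (List Int)) (out : Bool) : Decidable (Spec_is_valid_grid obj out) := by unfold Spec_is_valid_grid; infer_instance

-- ===== CLAIM (what is proved, stated in full; the proofs are below) =====
def Claim_equal_is_valid_grid : Prop := ∀ (obj : List (List Int)), Dom_is_valid_grid obj → Spec_is_valid_grid obj (is_valid_grid obj)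

-- ===== LEMMAS AND PROOFS =====

theorem pvCellLoop_eq (r : List Int) :
    pvCellLoop r = r.all (fun v => decide (0 ≤ v) && decide (v ≤ 9)) := by
  induction r with
  | nil => rfl
  | cons v rest ih =>
    simp only [pvCellLoop, List.all_cons, ih]
    by_cases h0 : (0:Int) ≤ v <;> by_cases h9 : v ≤ 9 <;> simp [h0, h9]

-- A's row loop, once the width is fixed, is an all() over the remaining rows
theorem pvRowLoop_some (rows : List (List Int)) (w : Int) :
    pvRowLoop rows (some w) =
      rows.all (fun r => !r.isEmpty && ((r.length : Int) == w) && pvCellLoop r) := by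
  induction rows with
  | nil => rfl
  | cons r rest ih =>
    simp only [pvRowLoop, Option.getD_some, List.all_cons]
    by_cases he : r.isEmpty
    · simp [he]
    · by_cases hw : (r.length : Int) = w
      · by_cases hc : pvCellLoop r = true <;> simp [he, hw, hc, ih]
      · simp [he, hw]

-- canonical form of A on a nonempty input
theorem pvA_canon (r : List Int) (rest : List (List Int)) :
    is_valid_grid (r :: rest) =
      (r :: rest).all (fun q => !q.isEmpty && ((q.length : Int) == (r.length : Int)) && pvCellLoop q) := by
  unfold is_valid_grid
  simp only [List.isEmpty_cons, if_false, Bool.false_eq_true, List.all_cons]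
  unfold pvRowLoop
  by_cases he : r.isEmpty
  · simp [he]
  · simp only [he, if_false, Option.getD_none, Bool.false_eq_true]
    rw [if_neg (by simp)]
    by_cases hc : pvCellLoop r = true
    · simp [hc, pvRowLoop_some]
    · simp [hc]

theorem pvFoldl_min_le_init (rs : List (List Int)) (a : Nat) :
    rs.foldl (fun a q => min a q.length) a ≤ a := by
  induction rs generalizing a with
  | nil => simp
  | cons q rest ih =>
    exact le_trans (ih (min a q.length)) (Nat.min_le_left _ _)

theorem pvFoldl_min_le_mem (rs : List (List Int)) (a : Nat) (q : List Int) (hq : q ∈ rs) :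
    rs.foldl (fun a q => min a q.length) a ≤ q.length := by
  induction rs generalizing a with
  | nil => cases hq
  | cons p rest ih =>
    rcases List.mem_cons.mp hq with h | h
    · subst h
      exact le_trans (pvFoldl_min_le_init rest _) (Nat.min_le_right _ _)
    · exact ih _ h

theorem pvFoldl_min_lb (rs : List (List Int)) (a c : Nat)
    (ha : c ≤ a) (h : ∀ q ∈ rs, c ≤ q.length) :
    c ≤ rs.foldl (fun a q => min a q.length) a := by
  induction rs generalizing a with
  | nil => simpa
  | cons q rest ih =>
    exact ih (min a q.length) (le_min ha (h q (by simp)))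
      (fun p hp => h p (by simp [hp]))

theorem pvSum_const (obj : List (List Int)) (w : Nat) (h : ∀ q ∈ obj, q.length = w) :
    (obj.map List.length).sum = obj.length * w := by
  induction obj with
  | nil => simp
  | cons q rest ih =>
    simp only [List.map_cons, List.sum_cons, List.length_cons, h q (by simp),
      ih (fun p hp => h p (by simp [hp]))]
    ring

-- if the sum equals rows * m and m is a lower bound, every row has length m
theorem pvSum_forces_eq (obj : List (List Int)) (m : Nat)
    (hlb : ∀ q ∈ obj, m ≤ q.length)
    (hsum : (obj.map List.length).sum = obj.length * m) :
    ∀ q ∈ obj, q.length = m := by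
  induction obj with
  | nil => intro q hq; cases hq
  | cons r rest ih =>
    have hr : m ≤ r.length := hlb r (by simp)
    have hrest_lb : ∀ q ∈ rest, m ≤ q.length := fun q hq => hlb q (by simp [hq])
    have hrest_ge : rest.length * m ≤ (rest.map List.length).sum := by
      clear hsum ih hlb hr
      induction rest with
      | nil => simp
      | cons p ps ihh =>
        simp only [List.length_cons, List.map_cons, List.sum_cons, Nat.succ_mul]
        have := hrest_lb p (by simp)
        have := ihh (fun q hq => hrest_lb q (by simp [hq]))
        omega
    simp only [List.map_cons, List.sum_cons, List.length_cons, Nat.succ_mul] at hsum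
    have hrlen : r.length = m := by omega
    have hsum' : (rest.map List.length).sum = rest.length * m := by omega
    intro q hq
    rcases List.mem_cons.mp hq with h | h
    · subst h; exact hrlen
    · exact ih hrest_lb hsum' q h

-- column-wise cell check equals row-wise cell check on a rectangular grid
theorem pvColwise_eq_rowwise (obj : List (List Int)) (m : Nat)
    (hlen : ∀ q ∈ obj, q.length = m) :
    ((List.range m).all (fun j => obj.all (fun r =>
        decide (0 ≤ r.getD j 0) && decide (r.getD j 0 ≤ 9))))
      = obj.all (fun r => r.all (fun v => decide (0 ≤ v) && decide (v ≤ 9))) := by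
  rw [Bool.eq_iff_iff]
  simp only [List.all_eq_true, List.mem_range]
  constructor
  · intro h r hr v hv
    obtain ⟨j, hj, rfl⟩ := List.mem_iff_getElem.mp hv
    have hjm : j < m := (hlen r hr) ▸ hj
    have := h j hjm r hr
    rwa [List.getD_eq_getElem r 0 hj] at this
  · intro h j hj r hr
    have hjr : j < r.length := (hlen r hr).symm ▸ hj
    rw [List.getD_eq_getElem r 0 hjr]
    exact h r hr _ (List.getElem_mem hjr)

theorem is_valid_grid_eq_alt (obj : List (List Int)) :
    is_valid_grid obj = is_valid_grid_alt obj := by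
  cases obj with
  | nil => rfl
  | cons r rest =>
    rw [pvA_canon]
    unfold is_valid_grid_alt
    simp only [List.isEmpty_cons, if_false, Bool.false_eq_true]
    set m := pvNCols (r :: rest) with hm
    have hlb : ∀ q ∈ (r :: rest), m ≤ q.length := by
      intro q hq
      rcases List.mem_cons.mp hq with h | h
      · rw [h]; exact pvFoldl_min_le_init rest r.length
      · exact pvFoldl_min_le_mem rest r.length q h
    by_cases hA : ((r :: rest).all
        (fun q => !q.isEmpty && ((q.length : Int) == (r.length : Int)) && pvCellLoop q)) = true
    · -- A is true: every row nonempty, length = r.length, cells ok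
      have hprops : ∀ q ∈ (r :: rest), q.length = r.length ∧ 0 < q.length ∧ pvCellLoop q = true := by
        intro q hq
        have h := (List.all_eq_true.mp hA) q hq
        simp only [Bool.and_eq_true, beq_iff_eq] at h
        obtain ⟨⟨h1, h2⟩, h3⟩ := h
        have hpos : 0 < q.length := by
          cases q with
          | nil => simp at h1
          | cons _ _ => simp
        exact ⟨by exact_mod_cast h2, hpos, h3⟩
      have hmr : m = r.length := le_antisymm (hlb r (by simp))
        (pvFoldl_min_lb rest (List.length r) (List.length r) le_rfl
          (fun q hq => (hprops q (by simp [hq])).1 ▸ le_rfl))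
      have hm0 : m ≠ 0 := by
        have := (hprops r (by simp)).2.1
        omega
      have hsum : ((r :: rest).map List.length).sum = (r :: rest).length * m := by
        rw [hmr]
        exact pvSum_const _ _ (fun q hq => (hprops q hq).1)
      rw [hA, if_neg hm0, if_neg (not_not_intro hsum)]
      rw [pvColwise_eq_rowwise _ m (fun q hq => (hprops q hq).1.trans hmr.symm)]
      symm
      refine List.all_eq_true.mpr (fun q hq => ?_)
      show (q.all fun v => decide (0 ≤ v) && decide (v ≤ 9)) = true
      rw [← pvCellLoop_eq]
      exact (hprops q hq).2.2
    · -- A is false: some shape or cell check fails; show B is false too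
      rw [Bool.eq_false_iff.mpr hA]
      by_cases hm0 : m = 0
      · simp [hm0]
      · rw [if_neg hm0]
        by_cases hsum : ((r :: rest).map List.length).sum = (r :: rest).length * m
        · -- shape is fine, so some cell must be bad
          have hlen : ∀ q ∈ (r :: rest), q.length = m := pvSum_forces_eq _ m hlb hsum
          rw [if_neg (not_not_intro hsum)]
          rw [pvColwise_eq_rowwise _ m hlen]
          symm
          rw [Bool.eq_false_iff]
          intro hcells
          apply hA
          refine List.all_eq_true.mpr (fun q hq => ?_)
          have hcq : (q.all fun v => decide (0 ≤ v) && decide (v ≤ 9)) = true :=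
            List.all_eq_true.mp hcells q hq
          have hq1 : q.length = m := hlen q hq
          have hr1 : r.length = m := hlen r (by simp)
          show (!q.isEmpty && ((q.length : Int) == (r.length : Int)) && pvCellLoop q) = true
          simp only [Bool.and_eq_true, beq_iff_eq]
          refine ⟨⟨?_, by rw [hq1, hr1]⟩, by rw [pvCellLoop_eq]; exact hcq⟩
          cases q with
          | nil => simp at hq1; omega
          | cons _ _ => simp
        · rw [if_pos hsum]

-- ===== VERDICT (by name: the statement is the Claim_ definition above) =====
theorem is_valid_grid_spec : Claim_equal_is_valid_grid := by
  intro obj _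
  exact is_valid_grid_eq_alt obj
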